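-- pv_equiv track=rewrite | github.com/celsopa/IFAL-ESTD114_Estrutura_de_dados | Lista02 - Strings/l2q5.py | nome_bio
-- ===== SOURCE A (Python) =====
-- def nome_bio(nomecompleto):
--     nome = ""
--     lista_nomes = []
--     resultado = ""
--     i = 0
--     for x in nomecompleto:
--         if x != " ":
--             nome += x
--         elif x == " ":
--             lista_nomes.append(nome)
--             nome = ""
--     else:
--         lista_nomes.append(nome)
--     resultado += lista_nomes[-1] + ", "
--     while True:
--         if lista_nomes[i] == lista_nomes[-1]:
--             break
--         resultado += lista_nomes[i][0]+"."
--         if lista_nomes[i+1] != lista_nomes[-1]: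
--             resultado += " "
--         i += 1
--     return resultado
-- ===== SOURCE B (Python) =====
-- def nome_bio(nomecompleto):
--     lista = nomecompleto.split(' ')
--     initials = [n[0] for n in lista[:-1]]
--     return lista[-1] + ', ' + ('. '.join(initials) + '.' if initials else '')
-- ===== Notes on version B (the rewrite author's own statement) =====
-- stated objective: idiomatic
-- what changed: A's manual character-accumulator split and index-lookahead while-loop with per-token separator decisions are replaced by split(' '), a comprehension taking the first letter of every name before the last, and one '. '.join; Pre_ excludes inputs with an empty token before the last one (consecutive/leading spaces), where one of the two programs raises IndexError on ''[0]. (split/join run at C level instead of A's per-character Python loop and repeated string concatenation)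
-- intended difference: On inputs where an earlier name equals the last name, A's value-based break stops at that first occurrence and silently drops the remaining initials (A('Silva Ana Silva') = 'Silva, '), while B abbreviates every name before the last ('Silva, S. A.'), which is the intended format. — e.g. on nome_bio("Silva Ana Silva"): A returns "Silva, ", B returns "Silva, S. A."
-- outside the precondition, e.g. on nome_bio('Ana Silva  Silva'): A returns 'Silva, A.', B raises IndexError
import Mathlib
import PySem

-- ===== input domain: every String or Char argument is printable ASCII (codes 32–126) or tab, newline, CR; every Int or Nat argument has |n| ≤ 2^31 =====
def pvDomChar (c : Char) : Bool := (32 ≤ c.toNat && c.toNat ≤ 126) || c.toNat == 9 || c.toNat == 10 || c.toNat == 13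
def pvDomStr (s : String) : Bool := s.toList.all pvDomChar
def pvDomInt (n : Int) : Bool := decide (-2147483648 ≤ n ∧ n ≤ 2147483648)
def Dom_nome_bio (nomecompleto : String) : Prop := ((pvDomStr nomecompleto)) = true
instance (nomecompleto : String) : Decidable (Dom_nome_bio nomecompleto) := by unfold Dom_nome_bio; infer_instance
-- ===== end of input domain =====

-- B replaces A's character-accumulator split and index-lookahead while-loop by split(' '),
-- a first-letters comprehension over all names before the last, and one '. '.join
-- (objective: idiomatic decomposition; see D_ for the intended difference on duplicate surnames).

-- ===== PORT A =====
-- one step of A's manual character split: nome accumulates non-space chars, a space flushes nome into lista_nomes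
def nomeBioStep (st : List Char × List (List Char)) (x : Char) : List Char × List (List Char) :=
  if x ≠ ' ' then (st.1 ++ [x], st.2)
  else if x = ' ' then ([], st.2 ++ [st.1])
  else st

-- A's 'while True' over increasing i, as structural recursion on the suffix lista_nomes[i:];
-- Python raises IndexError where pyGetD's default fires (empty token) — excluded by Pre_.
def nomeBioLoop (last : List Char) : List (List Char) → List Char
  | [] => []    -- Python: IndexError (unreachable: last occurs in the list)
  | t :: rest =>
    if t = last then []
    else PySem.List.pyGetD t 0 ' ' :: '.' ::
      ((if PySem.List.pyGetD rest 0 last ≠ last then [' '] else []) ++ nomeBioLoop last rest)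

def nome_bio (nomecompleto : String) : String :=
  let p := nomecompleto.toList.foldl nomeBioStep ([], [])
  let lista := p.2 ++ [p.1]         -- the for-else appends the final nome
  let last := PySem.List.pyGetD lista (-1) []
  String.ofList (last ++ [',', ' '] ++ nomeBioLoop last lista)

-- ===== PORT B =====
def nome_bio_alt (nomecompleto : String) : String :=
  let lista := PySem.Chars.splitOn nomecompleto.toList [' ']
  let initials := (PySem.List.slice lista none (some (-1))).map
    (fun n => PySem.List.pyGetD n 0 ' ')
  String.ofList (PySem.List.pyGetD lista (-1) [] ++ [',', ' '] ++
    (if initials ≠ [] then PySem.Chars.join ['.', ' '] (initials.map (fun c => [c])) ++ ['.'] else []))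

-- ===== PRECONDITION & SPEC =====
-- Pre_ excludes exactly the inputs with an empty token before the last one (leading or
-- consecutive spaces): there ''[0] raises IndexError in B, and in A too unless its loop
-- has already broken on an earlier duplicate of the last token.
def Pre_nome_bio (nomecompleto : String) : Prop :=
  ∀ t ∈ (PySem.Chars.splitOn nomecompleto.toList [' ']).dropLast, t ≠ []
instance (nomecompleto : String) : Decidable (Pre_nome_bio nomecompleto) := by unfold Pre_nome_bio; infer_instance
def pvWitness_nome_bio : String := "Joao Maria Silva"

-- On inputs where an earlier name equals the last name, A's value-based break stops at that
-- first occurrence and silently drops the remaining initials (A "Silva Ana Silva" = "Silva, "),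
-- while B abbreviates every name before the last ("Silva, S. A."), the intended format.
def D_nome_bio (nomecompleto : String) : Prop :=
  (PySem.Chars.splitOn nomecompleto.toList [' ']).getLastD [] ∈
    (PySem.Chars.splitOn nomecompleto.toList [' ']).dropLast
instance (nomecompleto : String) : Decidable (D_nome_bio nomecompleto) := by unfold D_nome_bio; infer_instance

def Spec_nome_bio (nomecompleto : String) (out : String) : Prop :=
  ¬ D_nome_bio nomecompleto → out = nome_bio_alt nomecompleto
instance (nomecompleto : String) (out : String) : Decidable (Spec_nome_bio nomecompleto out) := by unfold Spec_nome_bio; infer_instance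

def pvDiffWitness_nome_bio : String := "Silva Ana Silva"
def pvDiffWitnessOut_nome_bio : String × String := ("Silva, ", "Silva, S. A.")

-- ===== CLAIM (what is proved, stated in full; the proofs are below) =====
def Claim_unchanged_nome_bio : Prop := ∀ (nomecompleto : String), Dom_nome_bio nomecompleto → Pre_nome_bio nomecompleto → Spec_nome_bio nomecompleto (nome_bio nomecompleto)
def Claim_exact_nome_bio : Prop := ∀ (nomecompleto : String), Dom_nome_bio nomecompleto → Pre_nome_bio nomecompleto → D_nome_bio nomecompleto → nome_bio nomecompleto ≠ nome_bio_alt nomecompleto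
def Claim_changed_nome_bio : Prop := Dom_nome_bio (pvDiffWitness_nome_bio) ∧ Pre_nome_bio (pvDiffWitness_nome_bio) ∧ D_nome_bio (pvDiffWitness_nome_bio) ∧ nome_bio (pvDiffWitness_nome_bio) = pvDiffWitnessOut_nome_bio.1 ∧ nome_bio_alt (pvDiffWitness_nome_bio) = pvDiffWitnessOut_nome_bio.2 ∧ pvDiffWitnessOut_nome_bio.1 ≠ pvDiffWitnessOut_nome_bio.2

-- ===== LEMMAS AND PROOFS =====

-- A's fold over an accumulator list splits off as an append
lemma foldl_nomeBioStep_acc (l : List Char) (n : List Char) (a : List (List Char)) :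
    l.foldl nomeBioStep (n, a) =
      ((l.foldl nomeBioStep (n, [])).1, a ++ (l.foldl nomeBioStep (n, [])).2) := by
  induction l generalizing n a with
  | nil => simp
  | cons c rest ih =>
    by_cases hc : c = ' '
    · subst hc
      simp only [List.foldl_cons, nomeBioStep, ne_eq, not_true_eq_false, if_false, if_true,
        List.nil_append]
      rw [ih [] (a ++ [n]), ih [] [n]]
      simp
    · simp only [List.foldl_cons, nomeBioStep, ne_eq, hc, not_false_eq_true, if_pos]
      exact ih (n ++ [c]) a

-- PySem's fuel-based splitOn on the single-char separator ' ' IS A's character fold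
lemma splitOn_go_eq (l : List Char) : ∀ (fuel : Nat), l.length < fuel →
    ∀ (cur : List Char) (acc : List (List Char)),
    PySem.Chars.splitOn.go [' '] fuel l cur acc =
      acc.reverse ++ ((l.foldl nomeBioStep (cur.reverse, [])).2
        ++ [(l.foldl nomeBioStep (cur.reverse, [])).1]) := by
  induction l with
  | nil =>
    intro fuel hf cur acc
    obtain ⟨f, rfl⟩ : ∃ f, fuel = f + 1 := ⟨fuel - 1, by omega⟩
    rw [PySem.Chars.splitOn.go]
    simp
    omega
  | cons c rest ih =>
    intro fuel hf cur acc
    obtain ⟨f, rfl⟩ : ∃ f, fuel = f + 1 := ⟨fuel - 1, by omega⟩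
    rw [PySem.Chars.splitOn.go]
    by_cases hc : c = ' '
    · have hp : [' '].isPrefixOf (c :: rest) = true := by simp [hc, List.isPrefixOf]
      simp only [hp, if_pos, List.length_singleton, List.drop_one, List.tail_cons]
      rw [ih f (by simpa using hf) [] (cur.reverse :: acc)]
      subst hc
      simp only [List.foldl_cons, nomeBioStep, ne_eq, not_true_eq_false, if_false, if_true,
        List.reverse_nil, List.nil_append]
      rw [foldl_nomeBioStep_acc rest [] [cur.reverse]]
      simp
    · have hp : [' '].isPrefixOf (c :: rest) = false := by
        simp [List.isPrefixOf]; exact fun h => hc h.symm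
      simp only [hp, Bool.false_eq_true, if_false]
      rw [ih f (by simpa using hf) (c :: cur) acc]
      simp [nomeBioStep, hc]

-- the two programs build the same token list
lemma splitOn_eq_fold (s : List Char) :
    PySem.Chars.splitOn s [' '] =
      (s.foldl nomeBioStep ([], [])).2 ++ [(s.foldl nomeBioStep ([], [])).1] := by
  have := splitOn_go_eq s (s.length + 1) (by omega) [] []
  simpa [PySem.Chars.splitOn] using this

-- A's lookahead while-loop, on a token list whose ONLY occurrence of `last` is its final
-- element (all of which are nonempty before it), emits the '. '-joined initials of dropLast
lemma loop_eq_join (last : List Char) :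
    ∀ (xs : List (List Char)), last ∉ xs → (∀ t ∈ xs, t ≠ []) →
    nomeBioLoop last (xs ++ [last]) =
      (if xs.map (fun n => PySem.List.pyGetD n 0 ' ') ≠ [] then
        PySem.Chars.join ['.', ' ']
          ((xs.map (fun n => PySem.List.pyGetD n 0 ' ')).map (fun c => [c])) ++ ['.']
      else []) := by
  intro xs
  induction xs with
  | nil => intro _ _; simp [nomeBioLoop]
  | cons t rest ih =>
    intro hnm hne
    have ht : t ≠ last := fun h => hnm (h ▸ List.mem_cons_self)
    have htne : t ≠ [] := hne t List.mem_cons_self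
    obtain ⟨c, tl, rfl⟩ : ∃ c tl, t = c :: tl := by
      cases t with
      | nil => exact absurd rfl htne
      | cons c tl => exact ⟨c, tl, rfl⟩
    have hrec := ih (fun h => hnm (List.mem_cons_of_mem _ h))
      (fun u hu => hne u (List.mem_cons_of_mem _ hu))
    cases rest with
    | nil =>
      simp [nomeBioLoop, ht, PySem.List.pyGetD_zero_cons, PySem.Chars.join_singleton]
    | cons r rest' =>
      have hr : r ≠ last := fun h => hnm (List.mem_cons_of_mem _ (h ▸ List.mem_cons_self))
      have hrne : r ≠ [] := hne r (List.mem_cons_of_mem _ List.mem_cons_self)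
      obtain ⟨d, rtl, rfl⟩ : ∃ d rtl, r = d :: rtl := by
        cases r with
        | nil => exact absurd rfl hrne
        | cons d rtl => exact ⟨d, rtl, rfl⟩
      rw [List.cons_append, nomeBioLoop, if_neg ht, hrec]
      simp [PySem.List.pyGetD_zero_cons, hr, PySem.Chars.join_cons_cons]

-- first-occurrence split of a member
lemma memSplitFirst {α : Type} [DecidableEq α] (a : α) (l : List α) (h : a ∈ l) :
    ∃ s t, l = s ++ a :: t ∧ a ∉ s := by
  induction l with
  | nil => cases h
  | cons b l ih =>
    by_cases hb : b = a
    · exact ⟨[], l, by simp [hb], by simp⟩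
    · rcases ih (by
        rcases List.mem_cons.mp h with h | h
        · exact absurd h.symm hb
        · exact h) with ⟨u, t, rfl, hs⟩
      refine ⟨b :: u, t, rfl, ?_⟩
      simp only [List.mem_cons, not_or]
      exact ⟨fun h => hb h.symm, hs⟩

-- length of A's loop output: the initials strictly before the FIRST occurrence of `last`
lemma loop_len (last : List Char) : ∀ (xs rest : List (List Char)), last ∉ xs →
    (nomeBioLoop last (xs ++ last :: rest)).length =
      if xs = [] then 0 else 3 * xs.length - 1 := by
  intro xs
  induction xs with
  | nil => intro rest _; simp [nomeBioLoop]
  | cons t xs' ih =>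
    intro rest hnm
    have ht : t ≠ last := fun h => hnm (h ▸ List.mem_cons_self)
    have hnm' : last ∉ xs' := fun h => hnm (List.mem_cons_of_mem _ h)
    rw [List.cons_append, nomeBioLoop, if_neg ht]
    cases xs' with
    | nil => simp [nomeBioLoop, PySem.List.pyGetD_zero_cons]
    | cons u xs'' =>
      have hu : u ≠ last := fun h => hnm' (h ▸ List.mem_cons_self)
      have := ih rest hnm'
      simp only [List.length_cons] at this ⊢
      rw [List.cons_append] at this
      simp [List.cons_append, PySem.List.pyGetD_zero_cons, hu, this]
      omega

-- length of B's joined initials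
lemma join_len : ∀ (cs : List Char), cs ≠ [] →
    (PySem.Chars.join ['.', ' '] (cs.map (fun c => [c])) ++ ['.']).length = 3 * cs.length - 1 := by
  intro cs
  induction cs with
  | nil => intro h; exact absurd rfl h
  | cons c cs' ih =>
    intro _
    cases cs' with
    | nil => simp [PySem.Chars.join_singleton]
    | cons d cs'' =>
      have := ih (by simp)
      simp only [List.map_cons] at this ⊢
      rw [PySem.Chars.join_cons_cons]
      simp only [List.length_cons, List.length_append, List.length_nil] at this ⊢
      omega

-- ===== VERDICT (by name: the statement is the Claim_ definition above) =====
theorem nome_bio_spec : Claim_unchanged_nome_bio := by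
  intro s _ hpre hnd
  unfold Pre_nome_bio at hpre
  unfold D_nome_bio at hnd
  unfold nome_bio nome_bio_alt
  simp only [splitOn_eq_fold s.toList] at hpre hnd ⊢
  generalize hE : (s.toList.foldl nomeBioStep ([], [])).2 ++
    [(s.toList.foldl nomeBioStep ([], [])).1] = lista at hpre hnd ⊢
  obtain ⟨xs, a, rfl⟩ : ∃ xs a, lista = xs ++ [a] := by
    refine ⟨(s.toList.foldl nomeBioStep ([], [])).2, (s.toList.foldl nomeBioStep ([], [])).1, hE.symm⟩
  have hxs : (xs ++ [a]).dropLast = xs := by simp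
  have hgl : (xs ++ [a]).getLastD [] = a := by simp
  rw [hxs] at hpre
  rw [hgl, hxs] at hnd
  have hlast : PySem.List.pyGetD (xs ++ [a]) (-1) [] = a := by
    rw [PySem.List.pyGetD_neg_one (xs ++ [a]) [] (by simp)]
    simp
  rw [hlast, PySem.List.slice_to_neg_one, hxs]
  rw [loop_eq_join a xs hnd hpre]

theorem nome_bio_tight : Claim_exact_nome_bio := by
  intro s _ _ hd heq
  unfold D_nome_bio at hd
  unfold nome_bio nome_bio_alt at heq
  simp only [splitOn_eq_fold s.toList] at hd heq
  generalize hE : (s.toList.foldl nomeBioStep ([], [])).2 ++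
    [(s.toList.foldl nomeBioStep ([], [])).1] = lista at hd heq
  obtain ⟨xs, a, rfl⟩ : ∃ xs a, lista = xs ++ [a] := by
    refine ⟨(s.toList.foldl nomeBioStep ([], [])).2, (s.toList.foldl nomeBioStep ([], [])).1, hE.symm⟩
  rw [show (xs ++ [a]).getLastD [] = a by simp, show (xs ++ [a]).dropLast = xs by simp] at hd
  have hlast : PySem.List.pyGetD (xs ++ [a]) (-1) [] = a := by
    rw [PySem.List.pyGetD_neg_one (xs ++ [a]) [] (by simp)]
    simp
  rw [hlast, PySem.List.slice_to_neg_one, show (xs ++ [a]).dropLast = xs by simp] at heq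
  have hxs : xs ≠ [] := fun h => by simp [h] at hd
  have hini : xs.map (fun n => PySem.List.pyGetD n 0 ' ') ≠ [] := by
    simpa using hxs
  rw [if_pos hini] at heq
  have hlists := congrArg String.toList heq
  simp only [String.toList_ofList] at hlists
  have hlen := congrArg List.length hlists
  simp only [List.length_append] at hlen
  obtain ⟨u, t, rfl, hnm⟩ := memSplitFirst a xs hd
  have hA : (nomeBioLoop a ((u ++ a :: t) ++ [a])).length =
      if u = [] then 0 else 3 * u.length - 1 := by
    rw [List.append_assoc, List.cons_append]
    exact loop_len a u (t ++ [a]) hnm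
  have hB := join_len ((u ++ a :: t).map (fun n => PySem.List.pyGetD n 0 ' ')) hini
  rw [List.length_append] at hB
  rw [hA, hB] at hlen
  simp only [List.length_map, List.length_append, List.length_cons] at hlen
  split_ifs at hlen <;> omega

theorem nome_bio_changed : Claim_changed_nome_bio := by
  unfold Claim_changed_nome_bio; decide
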